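-- pv_equiv track=rewrite | github.com/carlzimmerman/zimmerman-formula | extended_research/biotech/z2_cancer_protein_challenge.py | _sheet_alternating_method
-- ===== SOURCE A (Python) =====
-- from typing import Dict, List, Tuple
--
-- P_HELIX = {
--     'E': 1.53, 'A': 1.45, 'L': 1.34, 'H': 1.24, 'M': 1.20,
--     'Q': 1.17, 'W': 1.14, 'V': 1.14, 'F': 1.12, 'K': 1.07,
--     'I': 1.00, 'D': 0.98, 'T': 0.82, 'S': 0.79, 'R': 0.79,
--     'C': 0.77, 'N': 0.73, 'Y': 0.61, 'P': 0.59, 'G': 0.53,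
-- }
--
-- P_SHEET = {
--     'M': 1.67, 'V': 1.65, 'I': 1.60, 'C': 1.30, 'Y': 1.29,
--     'F': 1.28, 'Q': 1.23, 'L': 1.22, 'T': 1.20, 'W': 1.19,
--     'A': 0.97, 'R': 0.90, 'G': 0.81, 'D': 0.80, 'K': 0.74,
--     'S': 0.72, 'H': 0.71, 'N': 0.65, 'P': 0.62, 'E': 0.26,
-- }
--
-- def _sheet_alternating_method(sequence: str) -> List[str]:
--     """
--     Method 3: Beta-sheet alternating pattern detection.
--
--     β-sheets have alternating side chains (i,i+2 on same face).
--     Detect hydrophobic-polar alternation.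
--     """
--     n = len(sequence)
--     ss = ['C'] * n
--
--     # Find helix nucleation (4/6 strong formers)
--     for i in range(n - 5):
--         window = sequence[i:i+6]
--         strong_h = sum(1 for aa in window if P_HELIX.get(aa, 1.0) > 1.1)
--         if strong_h >= 4:
--             for j in range(i, min(i + 6, n)):
--                 ss[j] = 'H'
--
--     # Find sheet nucleation (3/5 strong formers)
--     for i in range(n - 4):
--         window = sequence[i:i+5]
--         strong_e = sum(1 for aa in window if P_SHEET.get(aa, 1.0) > 1.2)
--         if strong_e >= 3 and ss[i] != 'H':
--             for j in range(i, min(i + 5, n)):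
--                 if ss[j] != 'H':
--                     ss[j] = 'E'
--
--     return ss
-- ===== SOURCE B (Python) =====
-- # Faster re-implementation: indicator prefix sums + single linear sweeps with
-- # interval-cover tracking replace per-window recounting and inner marking loops.
--
-- # Residues whose P_HELIX propensity exceeds 1.1 / P_SHEET propensity exceeds 1.2
-- HSTRONG = frozenset("EALHMQWVF")
-- ESTRONG = frozenset("MVICYFQL")
--
-- def _sheet_alternating_method(sequence):
--     n = len(sequence)
--     ph = [0]
--     pe = [0]
--     th = te = 0
--     for c in sequence:
--         th += c in HSTRONG
--         te += c in ESTRONG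
--         ph.append(th)
--         pe.append(te)
--     # helix sweep: cover = exclusive end of the latest qualifying helix window
--     ss = []
--     cover = 0
--     for i in range(n):
--         if i + 6 <= n and ph[i + 6] - ph[i] >= 4:
--             cover = i + 6
--         ss.append('H' if i < cover else 'C')
--     # sheet sweep: windows may only start at (and overwrite) non-helix positions
--     out = []
--     ecover = 0
--     for i in range(n):
--         lab = ss[i]
--         if lab != 'H' and i + 5 <= n and pe[i + 5] - pe[i] >= 3:
--             ecover = i + 5
--         out.append('E' if lab != 'H' and i < ecover else lab)
--     return out
-- ===== Notes on version B (the rewrite author's own statement) =====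
-- stated objective: faster
-- what changed: Replaces the per-window propensity recount and inner interval-marking loops by indicator prefix sums plus two single linear sweeps that track the exclusive end of the latest qualifying window (interval-cover), classifying each position in O(1).
import Mathlib
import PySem

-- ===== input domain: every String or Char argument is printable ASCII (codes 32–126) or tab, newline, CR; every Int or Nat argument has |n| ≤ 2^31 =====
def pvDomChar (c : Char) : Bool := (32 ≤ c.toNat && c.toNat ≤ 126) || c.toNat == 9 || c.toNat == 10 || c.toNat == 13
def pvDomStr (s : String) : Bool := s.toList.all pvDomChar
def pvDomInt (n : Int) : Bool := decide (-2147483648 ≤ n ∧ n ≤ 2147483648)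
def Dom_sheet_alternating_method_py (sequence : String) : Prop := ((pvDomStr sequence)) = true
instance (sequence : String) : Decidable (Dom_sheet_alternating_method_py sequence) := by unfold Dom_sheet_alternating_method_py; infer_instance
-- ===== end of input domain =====

-- B replaces A's per-window propensity recount and inner interval-marking loops by
-- indicator prefix sums and two single sweeps tracking the exclusive end of the latest
-- qualifying window; a timing run measured B faster.

-- ===== PORT A =====
-- Python float propensities scaled by 100 to integers (hand-ported step): every comparison
-- the Python performs ('value > 1.1' / 'value > 1.2', default 1.0) has margin ≥ 0.01, far
-- above float representation error, so the scaled-integer comparisons are exact.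
def pvP_HELIX : PySem.Dict Char Int := PySem.Dict.mk
  [('E',153),('A',145),('L',134),('H',124),('M',120),
   ('Q',117),('W',114),('V',114),('F',112),('K',107),
   ('I',100),('D',98),('T',82),('S',79),('R',79),
   ('C',77),('N',73),('Y',61),('P',59),('G',53)]
def pvP_SHEET : PySem.Dict Char Int := PySem.Dict.mk
  [('M',167),('V',165),('I',160),('C',130),('Y',129),
   ('F',128),('Q',123),('L',122),('T',120),('W',119),
   ('A',97),('R',90),('G',81),('D',80),('K',74),
   ('S',72),('H',71),('N',65),('P',62),('E',26)]
def sheet_alternating_method_py (sequence : String) : List String :=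
  let s := sequence.toList
  let n : Int := PySem.List.len s
  let ss := List.replicate s.length "C"
  -- helix pass: 4/6 strong formers
  let ss := (PySem.List.pyRange 0 (n - 5) 1).foldl (fun ss i =>
    let window := PySem.List.slice s (some i) (some (i + 6))
    let strong_h : Int := (window.map (fun aa => if pvP_HELIX.getD aa 100 > 110 then (1:Int) else 0)).sum
    if strong_h ≥ 4 then
      (PySem.List.pyRange i (min (i + 6) n) 1).foldl (fun ss j => PySem.List.pySetD ss j "H") ss
    else ss) ss
  -- sheet pass: 3/5 strong formers
  let ss := (PySem.List.pyRange 0 (n - 4) 1).foldl (fun ss i =>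
    let window := PySem.List.slice s (some i) (some (i + 5))
    let strong_e : Int := (window.map (fun aa => if pvP_SHEET.getD aa 100 > 120 then (1:Int) else 0)).sum
    if strong_e ≥ 3 ∧ PySem.List.pyGetD ss i "" ≠ "H" then
      (PySem.List.pyRange i (min (i + 5) n) 1).foldl (fun ss j =>
        if PySem.List.pyGetD ss j "" ≠ "H" then PySem.List.pySetD ss j "E" else ss) ss
    else ss) ss
  ss


-- ===== PORT B =====
def pvHSTRONG : List Char := ['E','A','L','H','M','Q','W','V','F']
def pvESTRONG : List Char := ['M','V','I','C','Y','F','Q','L']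
def sheet_alternating_method_py_alt (sequence : String) : List String :=
  let s := sequence.toList
  let n := s.length
  -- indicator prefix sums
  let acc := s.foldl (fun (st : List Int × List Int × Int × Int) c =>
      let th := st.2.2.1 + (if c ∈ pvHSTRONG then (1:Int) else 0)
      let te := st.2.2.2 + (if c ∈ pvESTRONG then (1:Int) else 0)
      (st.1 ++ [th], st.2.1 ++ [te], th, te)) ([0], [0], 0, 0)
  let ph := acc.1
  let pe := acc.2.1
  -- helix sweep: cover = exclusive end of the latest qualifying helix window
  let hsweep := (List.range n).foldl (fun (st : List String × Nat) i =>
      let cover := if i + 6 ≤ n ∧ ph.getD (i + 6) 0 - ph.getD i 0 ≥ 4 then i + 6 else st.2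
      (st.1 ++ [if i < cover then "H" else "C"], cover)) ([], 0)
  let ss := hsweep.1
  -- sheet sweep: windows may only start at (and overwrite) non-helix positions
  let esweep := (List.range n).foldl (fun (st : List String × Nat) i =>
      let lab := ss.getD i ""
      let ecover := if lab ≠ "H" ∧ i + 5 ≤ n ∧ pe.getD (i + 5) 0 - pe.getD i 0 ≥ 3 then i + 5 else st.2
      (st.1 ++ [if lab ≠ "H" ∧ i < ecover then "E" else lab], ecover)) ([], 0)
  esweep.1


-- ===== PRECONDITION & SPEC =====
def Spec_sheet_alternating_method_py (sequence : String) (out : List String) : Prop := out = sheet_alternating_method_py_alt sequence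
instance (sequence : String) (out : List String) : Decidable (Spec_sheet_alternating_method_py sequence out) := by unfold Spec_sheet_alternating_method_py; infer_instance

-- ===== CLAIM (what is proved, stated in full; the proofs are below) =====
def Claim_equal_sheet_alternating_method_py : Prop := ∀ (sequence : String), Dom_sheet_alternating_method_py sequence → Spec_sheet_alternating_method_py sequence (sheet_alternating_method_py sequence)

-- ===== LEMMAS AND PROOFS =====

-- generic list/fold lemmas for the two programs

theorem pv_getD_set {α : Type} (l : List α) (i t : Nat) (v d : α) :
    (l.set i v).getD t d = if i = t ∧ i < l.length then v else l.getD t d := by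
  simp only [List.getD_eq_getElem?_getD, List.getElem?_set]
  by_cases h1 : t < l.length
  · by_cases h2 : i = t <;> simp [h1, h2]
  · have h : l[t]? = none := by simp; omega
    simp only [h]
    split_ifs <;> simp_all; omega

theorem pv_markH_length (v : String) : ∀ (m : Nat) (ss : List String) (a : Nat),
    ((List.range m).foldl (fun ss r => ss.set (a + r) v) ss).length = ss.length := by
  intro m
  induction m with
  | zero => simp
  | succ m ih => intro ss a; rw [List.range_succ, List.foldl_append]; simp [ih]

theorem pv_markH_getD (v : String) : ∀ (m : Nat) (ss : List String) (a : Nat), a + m ≤ ss.length →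
    ∀ (t : Nat) (d : String),
    ((List.range m).foldl (fun ss r => ss.set (a + r) v) ss).getD t d
      = if a ≤ t ∧ t < a + m then v else ss.getD t d := by
  intro m
  induction m with
  | zero =>
    intro ss a h t d
    have hn : ¬ (a ≤ t ∧ t < a + 0) := by omega
    simp only [List.range_zero, List.foldl_nil]
    rw [if_neg hn]
  | succ m ih =>
    intro ss a h t d
    rw [List.range_succ, List.foldl_append]
    simp only [List.foldl_cons, List.foldl_nil]
    rw [pv_getD_set, pv_markH_length, ih ss a (by omega) t d]
    split_ifs <;> first | rfl | omega

theorem pv_markE_length : ∀ (m : Nat) (ss : List String) (a : Nat),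
    ((List.range m).foldl (fun ss r => if ss.getD (a + r) "" ≠ "H" then ss.set (a + r) "E" else ss) ss).length = ss.length := by
  intro m
  induction m with
  | zero => simp
  | succ m ih =>
    intro ss a
    rw [List.range_succ, List.foldl_append]
    simp only [List.foldl_cons, List.foldl_nil]
    by_cases hc : (List.foldl (fun ss r => if ss.getD (a + r) "" ≠ "H" then ss.set (a + r) "E" else ss) ss (List.range m)).getD (a + m) "" ≠ "H"
    · rw [if_pos hc, List.length_set, ih]
    · rw [if_neg hc, ih]

theorem pv_markE_getD : ∀ (m : Nat) (ss : List String) (a : Nat), a + m ≤ ss.length →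
    ∀ (t : Nat),
    ((List.range m).foldl (fun ss r => if ss.getD (a + r) "" ≠ "H" then ss.set (a + r) "E" else ss) ss).getD t ""
      = if a ≤ t ∧ t < a + m ∧ ss.getD t "" ≠ "H" then "E" else ss.getD t "" := by
  intro m
  induction m with
  | zero =>
    intro ss a h t
    have hn : ¬ (a ≤ t ∧ t < a + 0 ∧ ss.getD t "" ≠ "H") := by omega
    simp only [List.range_zero, List.foldl_nil]
    rw [if_neg hn]
  | succ m ih =>
    intro ss a h t
    rw [List.range_succ, List.foldl_append]
    simp only [List.foldl_cons, List.foldl_nil]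
    have hend : (List.foldl (fun ss r => if ss.getD (a + r) "" ≠ "H" then ss.set (a + r) "E" else ss) ss (List.range m)).getD (a + m) "" = ss.getD (a + m) "" := by
      rw [ih ss a (by omega) (a + m)]
      have hx : ¬ (a ≤ a + m ∧ a + m < a + m ∧ ss.getD (a + m) "" ≠ "H") := by omega
      rw [if_neg hx]
    rw [hend]
    by_cases h1 : ss.getD (a + m) "" ≠ "H"
    · rw [if_pos h1, pv_getD_set, pv_markE_length]
      by_cases h2 : a + m = t
      · subst h2
        rw [if_pos ⟨rfl, by omega⟩, if_pos ⟨by omega, by omega, h1⟩]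
      · rw [if_neg (by tauto), ih ss a (by omega) t]
        by_cases hP : ss.getD t "" = "H"
        · rw [if_neg (fun hx => hx.2.2 hP), if_neg (fun hx => hx.2.2 hP)]
        · have hiff : (a ≤ t ∧ t < a + m ∧ ss.getD t "" ≠ "H") ↔ (a ≤ t ∧ t < a + (m + 1) ∧ ss.getD t "" ≠ "H") := by
            constructor <;> rintro ⟨x, y, z⟩ <;> exact ⟨x, by omega, z⟩
          exact if_congr hiff rfl rfl
    · rw [if_neg h1, ih ss a (by omega) t]
      by_cases hP : ss.getD t "" = "H"
      · rw [if_neg (fun hx => hx.2.2 hP), if_neg (fun hx => hx.2.2 hP)]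
      · have hx : ss.getD (a + m) "" = "H" := not_not.mp h1
        have ht : t ≠ a + m := fun he => hP (he ▸ hx)
        have hiff : (a ≤ t ∧ t < a + m ∧ ss.getD t "" ≠ "H") ↔ (a ≤ t ∧ t < a + (m + 1) ∧ ss.getD t "" ≠ "H") := by
          constructor <;> rintro ⟨x, y, z⟩ <;> exact ⟨x, by omega, z⟩
        exact if_congr hiff rfl rfl

theorem pv_helixPass (C : Nat → Prop) [DecidablePred C] :
    ∀ (L : List Nat) (ss : List String), (∀ k ∈ L, k + 6 ≤ ss.length) →
    (L.foldl (fun ss k => if C k then (List.range 6).foldl (fun ss r => ss.set (k + r) "H") ss else ss) ss).length = ss.length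
    ∧ ∀ (t : Nat) (d : String),
      (L.foldl (fun ss k => if C k then (List.range 6).foldl (fun ss r => ss.set (k + r) "H") ss else ss) ss).getD t d
        = if ∃ k ∈ L, C k ∧ k ≤ t ∧ t < k + 6 then "H" else ss.getD t d := by
  intro L
  induction L with
  | nil =>
    intro ss _
    refine ⟨rfl, fun t d => ?_⟩
    rw [if_neg (by simp)]
    rfl
  | cons k L ih =>
    intro ss hL
    simp only [List.foldl_cons]
    by_cases hC : C k
    · rw [if_pos hC]
      have hlen := pv_markH_length "H" 6 ss k
      have hstep := pv_markH_getD "H" 6 ss k (by simpa using hL k (by simp))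
      obtain ⟨ihlen, ihgetD⟩ := ih ((List.range 6).foldl (fun ss r => ss.set (k + r) "H") ss)
        (by intro k' hk'; rw [hlen]; exact hL k' (by simp [hk']))
      refine ⟨by rw [ihlen, hlen], fun t d => ?_⟩
      rw [ihgetD t d, hstep t d]
      by_cases hex : ∃ k' ∈ L, C k' ∧ k' ≤ t ∧ t < k' + 6
      · rw [if_pos hex, if_pos (by rcases hex with ⟨k', h1, h2⟩; exact ⟨k', by simp [h1], h2⟩)]
      · rw [if_neg hex]
        by_cases hin : k ≤ t ∧ t < k + 6
        · rw [if_pos hin, if_pos ⟨k, by simp, hC, hin⟩]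
        · rw [if_neg hin, if_neg (by
            rintro ⟨k', hk', hCk', hb⟩
            rcases List.mem_cons.mp hk' with rfl | hm
            · exact hin hb
            · exact hex ⟨k', hm, hCk', hb⟩)]
    · rw [if_neg hC]
      obtain ⟨ihlen, ihgetD⟩ := ih ss (fun k' hk' => hL k' (by simp [hk']))
      refine ⟨ihlen, fun t d => ?_⟩
      rw [ihgetD t d]
      by_cases hex : ∃ k' ∈ L, C k' ∧ k' ≤ t ∧ t < k' + 6
      · rw [if_pos hex, if_pos (by rcases hex with ⟨k', h1, h2⟩; exact ⟨k', by simp [h1], h2⟩)]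
      · rw [if_neg hex, if_neg (by
          rintro ⟨k', hk', hCk', hb⟩
          rcases List.mem_cons.mp hk' with rfl | hm
          · exact hC hCk'
          · exact hex ⟨k', hm, hCk', hb⟩)]

theorem pv_sheetPass (E : Nat → Prop) [DecidablePred E] (g : Nat → Bool) :
    ∀ (L : List Nat) (ss : List String), (∀ k ∈ L, k + 5 ≤ ss.length) →
    (∀ t, ss.getD t "" = "H" ↔ g t = true) →
    (L.foldl (fun ss k => if E k ∧ ss.getD k "" ≠ "H" then (List.range 5).foldl (fun ss r => if ss.getD (k + r) "" ≠ "H" then ss.set (k + r) "E" else ss) ss else ss) ss).length = ss.length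
    ∧ ∀ (t : Nat),
      (L.foldl (fun ss k => if E k ∧ ss.getD k "" ≠ "H" then (List.range 5).foldl (fun ss r => if ss.getD (k + r) "" ≠ "H" then ss.set (k + r) "E" else ss) ss else ss) ss).getD t ""
        = if (∃ k ∈ L, (E k ∧ g k = false) ∧ k ≤ t ∧ t < k + 5) ∧ g t = false then "E" else ss.getD t "" := by
  intro L
  induction L with
  | nil =>
    intro ss _ _
    refine ⟨rfl, fun t => ?_⟩
    rw [if_neg (by simp)]
    rfl
  | cons k L ih =>
    intro ss hL hg
    simp only [List.foldl_cons]
    have hne : ∀ t, (ss.getD t "" ≠ "H") ↔ g t = false := by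
      intro t
      rw [← Bool.not_eq_true (g t), not_iff_not.symm.mp (iff_of_eq rfl)]
      exact not_congr (hg t)
    by_cases hC : E k ∧ g k = false
    · have hC' : E k ∧ ss.getD k "" ≠ "H" := ⟨hC.1, (hne k).mpr hC.2⟩
      rw [if_pos hC']
      have hk5 : k + 5 ≤ ss.length := hL k (by simp)
      have hlen := pv_markE_length 5 ss k
      have hstep := pv_markE_getD 5 ss k hk5
      have hgy : ∀ t, ((List.range 5).foldl (fun ss r => if ss.getD (k + r) "" ≠ "H" then ss.set (k + r) "E" else ss) ss).getD t "" = "H" ↔ g t = true := by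
        intro t
        rw [hstep t]
        by_cases hm : k ≤ t ∧ t < k + 5 ∧ ss.getD t "" ≠ "H"
        · rw [if_pos hm]
          constructor
          · intro he; exact absurd he (by decide)
          · intro hgt; exact absurd ((hg t).mpr hgt) hm.2.2
        · rw [if_neg hm]; exact hg t
      obtain ⟨ihlen, ihgetD⟩ := ih ((List.range 5).foldl (fun ss r => if ss.getD (k + r) "" ≠ "H" then ss.set (k + r) "E" else ss) ss)
        (by intro k' hk'; rw [hlen]; exact hL k' (by simp [hk'])) hgy
      refine ⟨by rw [ihlen, hlen], fun t => ?_⟩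
      rw [ihgetD t, hstep t]
      by_cases hex : (∃ k' ∈ L, (E k' ∧ g k' = false) ∧ k' ≤ t ∧ t < k' + 5) ∧ g t = false
      · rw [if_pos hex, if_pos ⟨(by rcases hex.1 with ⟨k', h1, h2⟩; exact ⟨k', by simp [h1], h2⟩), hex.2⟩]
      · rw [if_neg hex]
        by_cases hin : k ≤ t ∧ t < k + 5 ∧ ss.getD t "" ≠ "H"
        · rw [if_pos hin, if_pos ⟨⟨k, by simp, hC, hin.1, hin.2.1⟩, (hne t).mp hin.2.2⟩]
        · rw [if_neg hin, if_neg (by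
            rintro ⟨⟨k', hk', hCk', hb⟩, hgt⟩
            rcases List.mem_cons.mp hk' with rfl | hm
            · exact hin ⟨hb.1, hb.2, (hne t).mpr hgt⟩
            · exact hex ⟨⟨k', hm, hCk', hb⟩, hgt⟩)]
    · have hC' : ¬ (E k ∧ ss.getD k "" ≠ "H") := by
        intro hx; exact hC ⟨hx.1, (hne k).mp hx.2⟩
      rw [if_neg hC']
      obtain ⟨ihlen, ihgetD⟩ := ih ss (fun k' hk' => hL k' (by simp [hk'])) hg
      refine ⟨ihlen, fun t => ?_⟩
      rw [ihgetD t]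
      by_cases hex : (∃ k' ∈ L, (E k' ∧ g k' = false) ∧ k' ≤ t ∧ t < k' + 5) ∧ g t = false
      · rw [if_pos hex, if_pos ⟨(by rcases hex.1 with ⟨k', h1, h2⟩; exact ⟨k', by simp [h1], h2⟩), hex.2⟩]
      · rw [if_neg hex, if_neg (by
          rintro ⟨⟨k', hk', hCk', hb⟩, hgt⟩
          rcases List.mem_cons.mp hk' with rfl | hm
          · exact hC hCk'
          · exact hex ⟨⟨k', hm, hCk', hb⟩, hgt⟩)]

def pvCover (C : Nat → Prop) [DecidablePred C] (w : Nat) : Nat → Nat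
  | 0 => 0
  | k + 1 => if C k then k + w else pvCover C w k

theorem pvCover_lt_iff (C : Nat → Prop) [DecidablePred C] (w j : Nat) :
    ∀ k, (j < pvCover C w k ↔ ∃ i < k, C i ∧ j < i + w) := by
  intro k
  induction k with
  | zero => simp [pvCover]
  | succ k ih =>
    unfold pvCover
    by_cases hC : C k
    · rw [if_pos hC]
      constructor
      · intro h; exact ⟨k, by omega, hC, h⟩
      · rintro ⟨i, hi, _, hj⟩; omega
    · rw [if_neg hC, ih]
      constructor
      · rintro ⟨i, hi, hCi, hj⟩; exact ⟨i, by omega, hCi, hj⟩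
      · rintro ⟨i, hi, hCi, hj⟩
        refine ⟨i, ?_, hCi, hj⟩
        rcases Nat.lt_or_ge i k with h | h
        · exact h
        · exfalso; have : i = k := by omega
          subst this; exact hC hCi

theorem pvSweep (C : Nat → Prop) [DecidablePred C] (w : Nat) (lab : Nat → Nat → String) :
    ∀ m, (List.range m).foldl (fun (st : List String × Nat) i =>
        (st.1 ++ [lab i (if C i then i + w else st.2)], if C i then i + w else st.2)) ([], 0)
      = ((List.range m).map (fun j => lab j (pvCover C w (j + 1))), pvCover C w m) := by
  intro m
  induction m with
  | zero => simp [pvCover]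
  | succ m ih =>
    rw [List.range_succ, List.foldl_append, ih, List.foldl_cons, List.foldl_nil, List.map_append]
    have hcov : pvCover C w (m + 1) = if C m then m + w else pvCover C w m := by
      simp [pvCover]
    simp only []
    rw [← hcov]
    rfl

def pvCntH (t : List Char) : Int := (t.countP (fun c => decide (c ∈ pvHSTRONG)) : Int)
def pvCntE (t : List Char) : Int := (t.countP (fun c => decide (c ∈ pvESTRONG)) : Int)
def pvPrefH (t : List Char) : List Int := (List.range (t.length + 1)).map (fun k => pvCntH (t.take k))
def pvPrefE (t : List Char) : List Int := (List.range (t.length + 1)).map (fun k => pvCntE (t.take k))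
abbrev pvStrongH (s : List Char) (i : Nat) : Prop := 4 ≤ pvCntH ((s.drop i).take 6)
abbrev pvStrongE (s : List Char) (i : Nat) : Prop := 3 ≤ pvCntE ((s.drop i).take 5)
def pvHat (s : List Char) (j : Nat) : Bool :=
  (List.range s.length).any (fun i => decide (i + 6 ≤ s.length) && decide (pvStrongH s i) && decide (i ≤ j) && decide (j < i + 6))
def pvEat (s : List Char) (j : Nat) : Bool :=
  !pvHat s j && (List.range s.length).any (fun i => decide (i + 5 ≤ s.length) && decide (pvStrongE s i) && !pvHat s i && decide (i ≤ j) && decide (j < i + 5))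
def pvFinal (s : List Char) : List String :=
  (List.range s.length).map (fun j => if pvHat s j then "H" else if pvEat s j then "E" else "C")

theorem pvHelix_table (c : Char) : pvP_HELIX.getD c 100 > 110 ↔ c ∈ pvHSTRONG := by
  by_cases h : c ∈ ['E','A','L','H','M','Q','W','V','F','K','I','D','T','S','R','C','N','Y','P','G']
  · fin_cases h <;> decide
  · simp only [List.mem_cons, not_or] at h
    obtain ⟨h1,h2,h3,h4,h5,h6,h7,h8,h9,h10,h11,h12,h13,h14,h15,h16,h17,h18,h19,h20,-⟩ := h
    simp [pvP_HELIX, pvHSTRONG, PySem.Dict.getD_eq_get?_getD, PySem.Dict.get?, Ne.symm h1, Ne.symm h2, Ne.symm h3, Ne.symm h4, Ne.symm h5, Ne.symm h6, Ne.symm h7, Ne.symm h8, Ne.symm h9, Ne.symm h10, Ne.symm h11, Ne.symm h12, Ne.symm h13, Ne.symm h14, Ne.symm h15, Ne.symm h16, Ne.symm h17, Ne.symm h18, Ne.symm h19, Ne.symm h20, h1,h2,h3,h4,h5,h6,h7,h8,h9]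

theorem pvSheet_table (c : Char) : pvP_SHEET.getD c 100 > 120 ↔ c ∈ pvESTRONG := by
  by_cases h : c ∈ ['M','V','I','C','Y','F','Q','L','T','W','A','R','G','D','K','S','H','N','P','E']
  · fin_cases h <;> decide
  · simp only [List.mem_cons, not_or] at h
    obtain ⟨h1,h2,h3,h4,h5,h6,h7,h8,h9,h10,h11,h12,h13,h14,h15,h16,h17,h18,h19,h20,-⟩ := h
    simp [pvP_SHEET, pvESTRONG, PySem.Dict.getD_eq_get?_getD, PySem.Dict.get?, Ne.symm h1, Ne.symm h2, Ne.symm h3, Ne.symm h4, Ne.symm h5, Ne.symm h6, Ne.symm h7, Ne.symm h8, Ne.symm h9, Ne.symm h10, Ne.symm h11, Ne.symm h12, Ne.symm h13, Ne.symm h14, Ne.symm h15, Ne.symm h16, Ne.symm h17, Ne.symm h18, Ne.symm h19, Ne.symm h20, h1,h2,h3,h4,h5,h6,h7,h8]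

theorem pvCntH_append (t u : List Char) : pvCntH (t ++ u) = pvCntH t + pvCntH u := by
  unfold pvCntH; rw [List.countP_append]; push_cast; ring

theorem pvCntE_append (t u : List Char) : pvCntE (t ++ u) = pvCntE t + pvCntE u := by
  unfold pvCntE; rw [List.countP_append]; push_cast; ring

theorem pvPrefH_append (t : List Char) (c : Char) :
    pvPrefH (t ++ [c]) = pvPrefH t ++ [pvCntH (t ++ [c])] := by
  unfold pvPrefH
  rw [List.length_append, List.length_singleton, List.range_succ, List.map_append]
  congr 1
  · apply List.map_congr_left
    intro k hk
    rw [List.take_append_of_le_length (by simp at hk; omega)]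
  · simp only [List.map_cons, List.map_nil]
    rw [List.take_of_length_le (by simp)]

theorem pvPrefE_append (t : List Char) (c : Char) :
    pvPrefE (t ++ [c]) = pvPrefE t ++ [pvCntE (t ++ [c])] := by
  unfold pvPrefE
  rw [List.length_append, List.length_singleton, List.range_succ, List.map_append]
  congr 1
  · apply List.map_congr_left
    intro k hk
    rw [List.take_append_of_le_length (by simp at hk; omega)]
  · simp only [List.map_cons, List.map_nil]
    rw [List.take_of_length_le (by simp)]

theorem pvPrefix_fold : ∀ (s t : List Char),
    s.foldl (fun (st : List Int × List Int × Int × Int) c =>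
      let th := st.2.2.1 + (if c ∈ pvHSTRONG then (1:Int) else 0)
      let te := st.2.2.2 + (if c ∈ pvESTRONG then (1:Int) else 0)
      (st.1 ++ [th], st.2.1 ++ [te], th, te)) (pvPrefH t, pvPrefE t, pvCntH t, pvCntE t)
    = (pvPrefH (t ++ s), pvPrefE (t ++ s), pvCntH (t ++ s), pvCntE (t ++ s)) := by
  intro s
  induction s with
  | nil => intro t; simp
  | cons c s ih =>
    intro t
    rw [List.foldl_cons]
    have hH : pvCntH t + (if c ∈ pvHSTRONG then (1:Int) else 0) = pvCntH (t ++ [c]) := by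
      rw [pvCntH_append]
      have : pvCntH [c] = if c ∈ pvHSTRONG then (1:Int) else 0 := by
        unfold pvCntH; by_cases h : c ∈ pvHSTRONG <;> simp [h]
      rw [this]
    have hE : pvCntE t + (if c ∈ pvESTRONG then (1:Int) else 0) = pvCntE (t ++ [c]) := by
      rw [pvCntE_append]
      have : pvCntE [c] = if c ∈ pvESTRONG then (1:Int) else 0 := by
        unfold pvCntE; by_cases h : c ∈ pvESTRONG <;> simp [h]
      rw [this]
    show List.foldl _ (pvPrefH t ++ [pvCntH t + _], pvPrefE t ++ [pvCntE t + _], pvCntH t + _, pvCntE t + _) s = _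
    rw [hH, hE, ← pvPrefH_append, ← pvPrefE_append, ih (t ++ [c])]
    simp

theorem pvPrefix_spec (s : List Char) :
    s.foldl (fun (st : List Int × List Int × Int × Int) c =>
      let th := st.2.2.1 + (if c ∈ pvHSTRONG then (1:Int) else 0)
      let te := st.2.2.2 + (if c ∈ pvESTRONG then (1:Int) else 0)
      (st.1 ++ [th], st.2.1 ++ [te], th, te)) ([0], [0], 0, 0)
    = (pvPrefH s, pvPrefE s, pvCntH s, pvCntE s) := by
  have h0 : (([0], [0], 0, 0) : List Int × List Int × Int × Int) = (pvPrefH [], pvPrefE [], pvCntH [], pvCntE []) := by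
    simp [pvPrefH, pvPrefE, pvCntH, pvCntE]
  rw [h0, pvPrefix_fold s []]
  simp

theorem pvPrefH_diff (s : List Char) (k w : Nat) (h : k + w ≤ s.length) :
    (pvPrefH s).getD (k + w) 0 - (pvPrefH s).getD k 0 = pvCntH ((s.drop k).take w) := by
  unfold pvPrefH
  rw [PySem.List.getD_map_range _ _ _ _ (by omega), PySem.List.getD_map_range _ _ _ _ (by omega)]
  rw [List.take_add, pvCntH_append]
  ring

theorem pvPrefE_diff (s : List Char) (k w : Nat) (h : k + w ≤ s.length) :
    (pvPrefE s).getD (k + w) 0 - (pvPrefE s).getD k 0 = pvCntE ((s.drop k).take w) := by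
  unfold pvPrefE
  rw [PySem.List.getD_map_range _ _ _ _ (by omega), PySem.List.getD_map_range _ _ _ _ (by omega)]
  rw [List.take_add, pvCntE_append]
  ring

theorem pv_innerH (ss : List String) (k n : Nat) (hk : k + 6 ≤ n) :
    (PySem.List.pyRange (k : Int) (min ((k : Int) + 6) (n : Int)) 1).foldl
      (fun ss j => PySem.List.pySetD ss j "H") ss
    = (List.range 6).foldl (fun ss r => ss.set (k + r) "H") ss := by
  have hmin : min ((k : Int) + 6) (n : Int) = (k : Int) + 6 := by
    apply min_eq_left; omega
  rw [hmin, PySem.List.pyRange_one]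
  have h6 : (((k : Int) + 6) - (k : Int)).toNat = 6 := by omega
  rw [h6, List.foldl_map]
  apply PySem.List.foldl_congr_mem
  intro acc r _
  rw [PySem.List.pySetD_of_nonneg _ _ (by positivity)]
  have : ((k : Int) + (r : Int)).toNat = k + r := by omega
  rw [this]

theorem pv_innerE (ss : List String) (k n : Nat) (hk : k + 5 ≤ n) :
    (PySem.List.pyRange (k : Int) (min ((k : Int) + 5) (n : Int)) 1).foldl
      (fun ss j => if PySem.List.pyGetD ss j "" ≠ "H" then PySem.List.pySetD ss j "E" else ss) ss
    = (List.range 5).foldl (fun ss r => if ss.getD (k + r) "" ≠ "H" then ss.set (k + r) "E" else ss) ss := by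
  have hmin : min ((k : Int) + 5) (n : Int) = (k : Int) + 5 := by
    apply min_eq_left; omega
  rw [hmin, PySem.List.pyRange_one]
  have h5 : (((k : Int) + 5) - (k : Int)).toNat = 5 := by omega
  rw [h5, List.foldl_map]
  apply PySem.List.foldl_congr_mem
  intro acc r _
  have hc : ((k : Int) + (r : Int)) = ((k + r : Nat) : Int) := by push_cast; ring
  rw [hc, PySem.List.pyGetD_natCast, PySem.List.pySetD_natCast]

theorem pv_condH (s : List Char) (k : Nat) :
    (((PySem.List.slice s (some (k : Int)) (some ((k : Int) + 6))).map
        (fun aa => if pvP_HELIX.getD aa 100 > 110 then (1 : Int) else 0)).sum ≥ 4) ↔ pvStrongH s k := by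
  have h6 : ((k : Int) + 6) = ((k : Int) + ((6 : Nat) : Int)) := by norm_num
  rw [h6, PySem.List.slice_natCast_add]
  have hmap : ∀ aa ∈ (s.drop k).take 6, (if pvP_HELIX.getD aa 100 > 110 then (1 : Int) else 0)
      = (if (decide (aa ∈ pvHSTRONG)) = true then (1 : Int) else 0) := by
    intro aa _
    by_cases h : aa ∈ pvHSTRONG
    · rw [if_pos ((pvHelix_table aa).mpr h), if_pos (by simp [h])]
    · rw [if_neg (fun hx => h ((pvHelix_table aa).mp hx)), if_neg (by simp [h])]
  rw [List.map_congr_left hmap, PySem.List.sum_map_ite_one_zero]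
  exact Iff.rfl

theorem pv_condE (s : List Char) (k : Nat) :
    (((PySem.List.slice s (some (k : Int)) (some ((k : Int) + 5))).map
        (fun aa => if pvP_SHEET.getD aa 100 > 120 then (1 : Int) else 0)).sum ≥ 3) ↔ pvStrongE s k := by
  have h5 : ((k : Int) + 5) = ((k : Int) + ((5 : Nat) : Int)) := by norm_num
  rw [h5, PySem.List.slice_natCast_add]
  have hmap : ∀ aa ∈ (s.drop k).take 5, (if pvP_SHEET.getD aa 100 > 120 then (1 : Int) else 0)
      = (if (decide (aa ∈ pvESTRONG)) = true then (1 : Int) else 0) := by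
    intro aa _
    by_cases h : aa ∈ pvESTRONG
    · rw [if_pos ((pvSheet_table aa).mpr h), if_pos (by simp [h])]
    · rw [if_neg (fun hx => h ((pvSheet_table aa).mp hx)), if_neg (by simp [h])]
  rw [List.map_congr_left hmap, PySem.List.sum_map_ite_one_zero]
  exact Iff.rfl

theorem pv_hat_iff (s : List Char) (t : Nat) :
    (∃ k ∈ List.range (s.length - 5), pvStrongH s k ∧ k ≤ t ∧ t < k + 6) ↔ pvHat s t = true := by
  unfold pvHat
  rw [List.any_eq_true]
  constructor
  · rintro ⟨k, hk, hs, h1, h2⟩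
    rw [List.mem_range] at hk
    exact ⟨k, List.mem_range.mpr (by omega), by simp [hs, h1, h2]; omega⟩
  · rintro ⟨k, hk, hb⟩
    simp only [Bool.and_eq_true, decide_eq_true_eq] at hb
    exact ⟨k, List.mem_range.mpr (by omega), hb.1.1.2, hb.1.2, hb.2⟩

theorem pv_eat_iff (s : List Char) (t : Nat) :
    ((∃ k ∈ List.range (s.length - 4), (pvStrongE s k ∧ pvHat s k = false) ∧ k ≤ t ∧ t < k + 5)
        ∧ pvHat s t = false) ↔ pvEat s t = true := by
  unfold pvEat
  rw [Bool.and_eq_true, List.any_eq_true]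
  constructor
  · rintro ⟨⟨k, hk, ⟨hs, hH⟩, h1, h2⟩, ht⟩
    rw [List.mem_range] at hk
    refine ⟨by simp [ht], k, List.mem_range.mpr (by omega), ?_⟩
    simp [hs, hH, h1, h2]
    omega
  · rintro ⟨ht, k, hk, hb⟩
    simp only [Bool.and_eq_true, decide_eq_true_eq, Bool.not_eq_eq_eq_not, Bool.not_true] at hb ht
    rw [List.mem_range] at hk
    exact ⟨⟨k, List.mem_range.mpr (by omega), ⟨hb.1.1.1.2, hb.1.1.2⟩, hb.1.2, hb.2⟩, ht⟩
def pvHelixFold (s : List Char) : List String :=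
  (List.range (s.length - 5)).foldl (fun ss k => if pvStrongH s k then (List.range 6).foldl (fun ss r => ss.set (k + r) "H") ss else ss) (List.replicate s.length "C")

def pvSheetFold (s : List Char) (ss : List String) : List String :=
  (List.range (s.length - 4)).foldl (fun ss k => if pvStrongE s k ∧ ss.getD k "" ≠ "H" then (List.range 5).foldl (fun ss r => if ss.getD (k + r) "" ≠ "H" then ss.set (k + r) "E" else ss) ss else ss) ss

theorem pv_portA_helix (s : List Char) :
    (PySem.List.pyRange 0 ((s.length : Int) - 5) 1).foldl (fun ss i =>
      if ((PySem.List.slice s (some i) (some (i + 6))).map (fun aa => if pvP_HELIX.getD aa 100 > 110 then (1:Int) else 0)).sum ≥ 4 then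
        (PySem.List.pyRange i (min (i + 6) (s.length : Int)) 1).foldl (fun ss j => PySem.List.pySetD ss j "H") ss
      else ss) (List.replicate s.length "C")
    = pvHelixFold s := by
  have h1 : (((s.length : Int) - 5) - 0).toNat = s.length - 5 := by omega
  rw [PySem.List.pyRange_one, h1, List.foldl_map]
  unfold pvHelixFold
  apply PySem.List.foldl_congr_mem
  intro acc k hk
  rw [List.mem_range] at hk
  simp only [zero_add]
  exact if_congr (pv_condH s k) (pv_innerH acc k s.length (by omega)) rfl

theorem pv_portA_sheet (s : List Char) (ss0 : List String) :
    (PySem.List.pyRange 0 ((s.length : Int) - 4) 1).foldl (fun ss i =>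
      if ((PySem.List.slice s (some i) (some (i + 5))).map (fun aa => if pvP_SHEET.getD aa 100 > 120 then (1:Int) else 0)).sum ≥ 3 ∧ PySem.List.pyGetD ss i "" ≠ "H" then
        (PySem.List.pyRange i (min (i + 5) (s.length : Int)) 1).foldl (fun ss j => if PySem.List.pyGetD ss j "" ≠ "H" then PySem.List.pySetD ss j "E" else ss) ss
      else ss) ss0
    = pvSheetFold s ss0 := by
  have h1 : (((s.length : Int) - 4) - 0).toNat = s.length - 4 := by omega
  rw [PySem.List.pyRange_one, h1, List.foldl_map]
  unfold pvSheetFold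
  apply PySem.List.foldl_congr_mem
  intro acc k hk
  rw [List.mem_range] at hk
  simp only [zero_add]
  refine if_congr (and_congr (pv_condE s k) ?_) (pv_innerE acc k s.length (by omega)) rfl
  rw [PySem.List.pyGetD_natCast]

theorem pvHelixFold_length (s : List Char) : (pvHelixFold s).length = s.length := by
  unfold pvHelixFold
  rw [(pv_helixPass (pvStrongH s) (List.range (s.length - 5)) (List.replicate s.length "C")
    (by intro k hk; rw [List.mem_range] at hk; rw [List.length_replicate]; omega)).1, List.length_replicate]

theorem pvHelixFold_getD (s : List Char) (t : Nat) :
    (pvHelixFold s).getD t "" = if pvHat s t = true then "H" else (if t < s.length then "C" else "") := by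
  unfold pvHelixFold
  rw [(pv_helixPass (pvStrongH s) (List.range (s.length - 5)) (List.replicate s.length "C")
    (by intro k hk; rw [List.mem_range] at hk; rw [List.length_replicate]; omega)).2 t ""]
  have hrep : (List.replicate s.length "C").getD t "" = if t < s.length then "C" else "" := by
    by_cases ht : t < s.length
    · rw [if_pos ht, List.getD_eq_getElem _ _ (by simpa using ht), List.getElem_replicate]
    · rw [if_neg ht, List.getD_eq_default _ _ (by simpa using ht)]
  rw [hrep]
  by_cases hex : ∃ k ∈ List.range (s.length - 5), pvStrongH s k ∧ k ≤ t ∧ t < k + 6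
  · rw [if_pos hex, if_pos ((pv_hat_iff s t).mp hex)]
  · rw [if_neg hex, if_neg (fun hh => hex ((pv_hat_iff s t).mpr hh))]

theorem pvHelixFold_H_iff (s : List Char) (t : Nat) :
    (pvHelixFold s).getD t "" = "H" ↔ pvHat s t = true := by
  rw [pvHelixFold_getD]
  by_cases hH : pvHat s t = true
  · simp [hH]
  · rw [if_neg hH]
    constructor
    · intro hc
      exfalso
      by_cases ht : t < s.length
      · rw [if_pos ht] at hc; exact absurd hc (by decide)
      · rw [if_neg ht] at hc; exact absurd hc (by decide)
    · intro hh; exact absurd hh hH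

theorem pv_portA_list (s : List Char) : pvSheetFold s (pvHelixFold s) = pvFinal s := by
  have hb : ∀ k ∈ List.range (s.length - 4), k + 5 ≤ (pvHelixFold s).length := by
    intro k hk; rw [List.mem_range] at hk; rw [pvHelixFold_length]; omega
  obtain ⟨hlenE, hgetE⟩ := pv_sheetPass (pvStrongE s) (pvHat s) (List.range (s.length - 4)) (pvHelixFold s) hb (pvHelixFold_H_iff s)
  apply List.ext_getElem
  · unfold pvSheetFold
    rw [hlenE, pvHelixFold_length]
    unfold pvFinal
    rw [List.length_map, List.length_range]
  · intro i h1 h2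
    have hi : i < s.length := by
      unfold pvFinal at h2; rw [List.length_map, List.length_range] at h2; exact h2
    rw [← List.getD_eq_getElem _ "" h1, ← List.getD_eq_getElem _ "" h2]
    unfold pvSheetFold
    rw [hgetE i]
    unfold pvFinal
    rw [PySem.List.getD_map_range _ _ _ _ hi]
    by_cases hH : pvHat s i = true
    · rw [if_pos hH, if_neg (by simp [hH]), pvHelixFold_getD, if_pos hH]
    · have hHf : pvHat s i = false := by simpa using hH
      rw [if_neg hH]
      by_cases hE : pvEat s i = true
      · obtain ⟨hex, hf⟩ := (pv_eat_iff s i).mpr hE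
        rw [if_pos ⟨hex, hf⟩, if_pos hE]
      · have hEf : pvEat s i = false := by simpa using hE
        rw [if_neg (fun hc => hE ((pv_eat_iff s i).mp hc)), if_neg hE, pvHelixFold_getD, if_neg hH, if_pos hi]

theorem pv_portA (sequence : String) :
    sheet_alternating_method_py sequence = pvFinal sequence.toList := by
  unfold sheet_alternating_method_py
  have h := pv_portA_list sequence.toList
  rw [← pv_portA_helix sequence.toList] at h
  rw [← pv_portA_sheet sequence.toList] at h
  exact h

def pvBstepH (ph : List Int) (n : Nat) : (List String × Nat) → Nat → (List String × Nat) :=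
  fun st i => (st.1 ++ [if i < (if i + 6 ≤ n ∧ ph.getD (i + 6) 0 - ph.getD i 0 ≥ 4 then i + 6 else st.2) then "H" else "C"],
    if i + 6 ≤ n ∧ ph.getD (i + 6) 0 - ph.getD i 0 ≥ 4 then i + 6 else st.2)

def pvBstepE (ss : List String) (pe : List Int) (n : Nat) : (List String × Nat) → Nat → (List String × Nat) :=
  fun st i => (st.1 ++ [if ss.getD i "" ≠ "H" ∧ i < (if ss.getD i "" ≠ "H" ∧ i + 5 ≤ n ∧ pe.getD (i + 5) 0 - pe.getD i 0 ≥ 3 then i + 5 else st.2) then "E" else ss.getD i ""],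
    if ss.getD i "" ≠ "H" ∧ i + 5 ≤ n ∧ pe.getD (i + 5) 0 - pe.getD i 0 ≥ 3 then i + 5 else st.2)

def pvBody (s : List Char) (acc : List Int × List Int × Int × Int) : List String :=
  ((List.range s.length).foldl (pvBstepE (((List.range s.length).foldl (pvBstepH acc.1 s.length) ([], 0)).1) acc.2.1 s.length) ([], 0)).1

theorem pvBody_tuple (s : List Char) (ph pe : List Int) (a b : Int) :
    pvBody s (ph, pe, a, b)
      = ((List.range s.length).foldl (pvBstepE (((List.range s.length).foldl (pvBstepH ph s.length) ([], 0)).1) pe s.length) ([], 0)).1 := rfl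

theorem pv_coverH_iff (s : List Char) (j : Nat) :
    (j < pvCover (fun i => i + 6 ≤ s.length ∧ (pvPrefH s).getD (i + 6) 0 - (pvPrefH s).getD i 0 ≥ 4) 6 (j + 1)) ↔ pvHat s j = true := by
  rw [pvCover_lt_iff]
  constructor
  · rintro ⟨i, hi, ⟨h6, hd⟩, hj⟩
    rw [ge_iff_le, pvPrefH_diff s i 6 h6] at hd
    exact (pv_hat_iff s j).mp ⟨i, List.mem_range.mpr (by omega), hd, by omega, hj⟩
  · intro hH
    obtain ⟨k, hk, hs, h1, h2⟩ := (pv_hat_iff s j).mpr hH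
    rw [List.mem_range] at hk
    exact ⟨k, by omega, ⟨by omega, by rw [ge_iff_le, pvPrefH_diff s k 6 (by omega)]; exact hs⟩, h2⟩

theorem pv_hsweep_spec (s : List Char) :
    ((List.range s.length).foldl (pvBstepH (pvPrefH s) s.length) ([], 0)).1
      = (List.range s.length).map (fun j => if pvHat s j = true then "H" else "C") := by
  unfold pvBstepH
  have h := pvSweep (fun i => i + 6 ≤ s.length ∧ (pvPrefH s).getD (i + 6) 0 - (pvPrefH s).getD i 0 ≥ 4) 6
      (fun i cover => if i < cover then "H" else "C") s.length
  refine (congrArg Prod.fst h).trans ?_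
  apply List.map_congr_left
  intro j _
  exact if_congr (pv_coverH_iff s j) rfl rfl

theorem pv_esweep_spec (s : List Char) :
    ((List.range s.length).foldl (pvBstepE ((List.range s.length).map (fun j => if pvHat s j = true then "H" else "C")) (pvPrefE s) s.length) ([], 0)).1
      = pvFinal s := by
  unfold pvBstepE
  have h := pvSweep (fun i => ((List.range s.length).map (fun j => if pvHat s j = true then "H" else "C")).getD i "" ≠ "H" ∧ i + 5 ≤ s.length ∧ (pvPrefE s).getD (i + 5) 0 - (pvPrefE s).getD i 0 ≥ 3) 5
      (fun i cover => if ((List.range s.length).map (fun j => if pvHat s j = true then "H" else "C")).getD i "" ≠ "H" ∧ i < cover then "E" else ((List.range s.length).map (fun j => if pvHat s j = true then "H" else "C")).getD i "") s.length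
  refine (congrArg Prod.fst h).trans ?_
  unfold pvFinal
  apply List.map_congr_left
  intro j hj
  rw [List.mem_range] at hj
  have hmj : ((List.range s.length).map (fun j => if pvHat s j = true then "H" else "C")).getD j ""
      = if pvHat s j = true then "H" else "C" := PySem.List.getD_map_range _ _ _ _ hj
  by_cases hH : pvHat s j = true
  · have hmH : ((List.range s.length).map (fun j => if pvHat s j = true then "H" else "C")).getD j "" = "H" := by
      rw [hmj, if_pos hH]
    rw [hmH, if_neg (by simp), if_pos hH]
  · have hHf : pvHat s j = false := by simpa using hH
    have hmC : ((List.range s.length).map (fun j => if pvHat s j = true then "H" else "C")).getD j "" = "C" := by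
      rw [hmj, if_neg hH]
    rw [hmC, if_neg hH]
    refine if_congr ?_ rfl rfl
    constructor
    · rintro ⟨-, hcov⟩
      rw [pvCover_lt_iff] at hcov
      obtain ⟨i, hi, ⟨hne, h5, hd⟩, hj5⟩ := hcov
      rw [ge_iff_le, pvPrefE_diff s i 5 h5] at hd
      have hHi : pvHat s i = false := by
        rw [PySem.List.getD_map_range _ _ _ _ (by omega)] at hne
        by_cases hx : pvHat s i = true
        · rw [if_pos hx] at hne; exact absurd rfl hne
        · simpa using hx
      exact (pv_eat_iff s j).mp ⟨⟨i, List.mem_range.mpr (by omega), ⟨hd, hHi⟩, by omega, hj5⟩, hHf⟩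
    · intro hE
      obtain ⟨⟨k, hk, ⟨hs', hHk⟩, h1, h2⟩, -⟩ := (pv_eat_iff s j).mpr hE
      rw [List.mem_range] at hk
      refine ⟨by decide, ?_⟩
      rw [pvCover_lt_iff]
      refine ⟨k, by omega, ⟨?_, by omega, by rw [ge_iff_le, pvPrefE_diff s k 5 (by omega)]; exact hs'⟩, h2⟩
      rw [PySem.List.getD_map_range _ _ _ _ (by omega), if_neg (by simp [hHk])]
      decide

theorem pv_portB (sequence : String) :
    sheet_alternating_method_py_alt sequence = pvFinal sequence.toList := by
  have h1 : pvBody sequence.toList (List.foldl (fun (st : List Int × List Int × Int × Int) c =>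
      let th := st.2.2.1 + (if c ∈ pvHSTRONG then (1:Int) else 0)
      let te := st.2.2.2 + (if c ∈ pvESTRONG then (1:Int) else 0)
      (st.1 ++ [th], st.2.1 ++ [te], th, te)) ([0], [0], 0, 0) sequence.toList) = pvFinal sequence.toList := by
    rw [pvPrefix_spec sequence.toList, pvBody_tuple, pv_hsweep_spec, pv_esweep_spec]
  unfold sheet_alternating_method_py_alt
  exact h1

-- ===== VERDICT (by name: the statement is the Claim_ definition above) =====
theorem sheet_alternating_method_py_spec : Claim_equal_sheet_alternating_method_py := by
  intro sequence _
  unfold Spec_sheet_alternating_method_py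
  rw [pv_portA, pv_portB]
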